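-- pv_equiv track=rewrite | github.com/CS17B011/MergedRepos | 99-Problems-master/Python/P28.py | groupijk
-- ===== SOURCE A (Python) =====
-- from itertools import combinations
--
-- def groupijk(X,i,j,k):
-- 	G1 = []
-- 	G2 = []
-- 	G3 = []
-- 	G = []
-- 	if len(X)!=i+j+k:
-- 		return
-- 	G3 = combinations(X,i)
-- 	for ei in G3:
-- 		tmp = [x for x in X if x not in ei]
-- 		G2 = combinations(tmp,j)
-- 		for ej in G2:
-- 			G1 = tuple([x for x in tmp if x not in ej])
-- 			G.append([ei,ej,G1])
-- 	return G
-- ===== SOURCE B (Python) =====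
-- from itertools import combinations
--
-- def groupijk(X, i, j, k):
--     if len(X) != i + j + k:
--         return
--     def helper(pool, sizes):
--         if not sizes:
--             return [[tuple(pool)]]
--         return [[c, *rest]
--                 for c in combinations(pool, sizes[0])
--                 for rest in helper([x for x in pool if x not in c], sizes[1:])]
--     return helper(X, [i, j])
-- ===== Notes on version B (the rewrite author's own statement) =====
-- stated objective: simpler
-- what changed: Replaces A's fixed two-deep loop nest with a recursive partitioner over the list of group sizes (the last group is the remaining pool), generalizing the structure while producing the same groupings in the same order.
import Mathlib
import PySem

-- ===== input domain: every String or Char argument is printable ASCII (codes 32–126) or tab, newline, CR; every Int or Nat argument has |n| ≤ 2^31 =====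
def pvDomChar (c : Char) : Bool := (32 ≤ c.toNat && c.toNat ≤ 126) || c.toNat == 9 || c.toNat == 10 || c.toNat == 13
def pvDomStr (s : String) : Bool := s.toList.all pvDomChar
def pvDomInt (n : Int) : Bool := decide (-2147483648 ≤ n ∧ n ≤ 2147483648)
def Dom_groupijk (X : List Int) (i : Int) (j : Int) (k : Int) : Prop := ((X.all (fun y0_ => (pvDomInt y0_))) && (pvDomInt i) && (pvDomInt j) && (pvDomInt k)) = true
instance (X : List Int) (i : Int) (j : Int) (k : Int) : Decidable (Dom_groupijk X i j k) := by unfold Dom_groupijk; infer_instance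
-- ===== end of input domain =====

-- B replaces A's fixed two-deep loop nest by a recursive partitioner over the list of
-- group sizes (simpler decomposition; same cost, same value-based element removal).

-- itertools.combinations(pool, r) in lexicographic order (shared library helper of both Pythons)
def pyCombinations : Nat → List Int → List (List Int)
  | 0, _ => [[]]
  | _ + 1, [] => []
  | n + 1, x :: xs => (pyCombinations n xs).map (x :: ·) ++ pyCombinations (n + 1) xs
termination_by _ l => l.length

-- ===== PORT A =====
def groupijk (X : List Int) (i : Int) (j : Int) (k : Int) : Option (List (List (List Int))) :=
  if (X.length : Int) ≠ i + j + k then none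
  else
    some ((pyCombinations i.toNat X).foldl (fun G ei =>
      let tmp := X.filter (fun x => !(ei.contains x))
      (pyCombinations j.toNat tmp).foldl (fun G ej =>
        G ++ [[ei, ej, tmp.filter (fun x => !(ej.contains x))]]) G) [])

-- ===== PORT B =====
-- helper(pool, sizes): choose a combination for each listed size, the last group is the rest
def pvHelper (pool : List Int) (sizes : List Nat) : List (List (List Int)) :=
  match sizes with
  | [] => [[pool]]
  | s :: rest =>
    (pyCombinations s pool).flatMap (fun c =>
      (pvHelper (pool.filter (fun x => !(c.contains x))) rest).map (c :: ·))

def groupijk_alt (X : List Int) (i : Int) (j : Int) (k : Int) : Option (List (List (List Int))) :=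
  if (X.length : Int) ≠ i + j + k then none
  else some (pvHelper X [i.toNat, j.toNat])

-- ===== PRECONDITION & SPEC =====
-- Pre_ excludes exactly the inputs where Python A raises ValueError: sizes match and i is
-- negative, or i fits but j is negative (combinations with a negative r).
def Pre_groupijk (X : List Int) (i : Int) (j : Int) (k : Int) : Prop :=
  (X.length : Int) = i + j + k → (0 ≤ i ∧ (j < 0 → (X.length : Int) < i))
instance (X : List Int) (i : Int) (j : Int) (k : Int) : Decidable (Pre_groupijk X i j k) := by unfold Pre_groupijk; infer_instance

def pvWitness_groupijk : List Int × Int × Int × Int := ([1, 2, 3, 4], 1, 2, 1)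

def Spec_groupijk (X : List Int) (i : Int) (j : Int) (k : Int) (out : Option (List (List (List Int)))) : Prop := out = groupijk_alt X i j k
instance (X : List Int) (i : Int) (j : Int) (k : Int) (out : Option (List (List (List Int)))) : Decidable (Spec_groupijk X i j k out) := by unfold Spec_groupijk; infer_instance

-- ===== CLAIM (what is proved, stated in full; the proofs are below) =====
def Claim_equal_groupijk : Prop := ∀ (X : List Int) (i : Int) (j : Int) (k : Int), Dom_groupijk X i j k → Pre_groupijk X i j k → Spec_groupijk X i j k (groupijk X i j k)

-- ===== LEMMAS AND PROOFS =====

theorem foldl_append_gen {α β : Type} (l : List α) (g : α → List β) (init : List β) :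
    l.foldl (fun G e => G ++ g e) init = init ++ l.flatMap g := by
  induction l generalizing init with
  | nil => simp
  | cons x xs ih => simp [List.foldl, ih, List.flatMap_cons]

theorem pvHelper_single (pool : List Int) (s : Nat) :
    pvHelper pool [s] = (pyCombinations s pool).flatMap
      (fun c => [[c, pool.filter (fun x => !(c.contains x))]]) := by
  simp [pvHelper]

-- ===== VERDICT (by name: the statement is the Claim_ definition above) =====
theorem groupijk_spec : Claim_equal_groupijk := by
  intro X i j k _ _
  unfold Spec_groupijk groupijk groupijk_alt
  split
  · rfl
  · congr 1
    rw [pvHelper]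
    simp only [foldl_append_gen, List.nil_append]
    congr 1
    funext ei
    rw [pvHelper_single]
    simp [List.map_flatMap]
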